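-- pv_equiv track=rewrite | github.com/000hai000/ds_salary_project | ds_salary_cleaning.py | remove_percentage_substring
-- ===== SOURCE A (Python) =====
-- def remove_percentage_substring(string):
--     res = string
--     end = string.find("%")
--     for i in range(end, -1, -1):
--         if string[i] == " ":
--             stop = i
--             res = string[0:stop]
--             break
--     return res
-- ===== SOURCE B (Python) =====
-- def remove_percentage_substring(string):
--     last_space = None
--     for i, ch in enumerate(string):
--         if ch == "%":
--             return string[0:last_space] if last_space is not None else string
--         if ch == " ":
--             last_space = i
--     return string
-- ===== Notes on version B (the rewrite author's own statement) =====
-- stated objective: alternative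
-- what changed: Replaces A's find-the-percent-sign-then-scan-backward-for-a-space structure with a single forward pass that remembers the index of the most recent space and truncates there when the first percent sign is reached.
import Mathlib
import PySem

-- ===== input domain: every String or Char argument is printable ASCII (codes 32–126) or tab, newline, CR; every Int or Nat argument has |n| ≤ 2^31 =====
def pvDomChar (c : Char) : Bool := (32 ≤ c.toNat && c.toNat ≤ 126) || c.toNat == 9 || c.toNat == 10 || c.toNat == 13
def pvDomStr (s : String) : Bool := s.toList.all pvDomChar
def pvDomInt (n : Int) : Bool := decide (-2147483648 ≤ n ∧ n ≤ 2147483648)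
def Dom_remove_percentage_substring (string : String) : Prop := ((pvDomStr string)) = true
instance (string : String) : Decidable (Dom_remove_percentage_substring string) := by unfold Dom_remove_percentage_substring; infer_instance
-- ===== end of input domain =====

-- B replaces A's find-the-percent-sign-then-scan-backward-for-a-space structure with a single
-- forward pass that remembers the last space seen so far (objective: alternative decomposition).

-- ===== PORT A =====
-- the 'for i in range(end, -1, -1): if string[i] == " ": … break' loop; every visited index
-- is in range, so string[i] (PySem.Str.pyGet?) never signals IndexError on this loop's indices
def pvALoop (string : String) (idxs : List Int) (res : String) : String :=
  match idxs with
  | [] => res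
  | i :: rest =>
    if PySem.Str.pyGet? string i = some ' ' then
      PySem.Str.slice string (some 0) (some i)       -- res = string[0:stop]; break
    else pvALoop string rest res

def remove_percentage_substring (string : String) : String :=
  let res := string
  let e := PySem.Str.find string "%"
  pvALoop string (PySem.List.pyRange e (-1) (-1)) res

-- ===== PORT B =====
-- 'for i, ch in enumerate(string)' with running last_space; returns string[0:last_space] at the first '%'
def pvBLoop (string : String) (cs : List Char) (i : Nat) (last : Option Nat) : String :=
  match cs with
  | [] => string
  | c :: rest =>
    if c = '%' then
      match last with
      | some j => PySem.Str.slice string (some 0) (some (j : Int))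
      | none => string
    else pvBLoop string rest (i + 1) (if c = ' ' then some i else last)

def remove_percentage_substring_alt (string : String) : String :=
  pvBLoop string string.toList 0 none

-- ===== PRECONDITION & SPEC =====
def Spec_remove_percentage_substring (string : String) (out : String) : Prop := out = remove_percentage_substring_alt string
instance (string : String) (out : String) : Decidable (Spec_remove_percentage_substring string out) := by unfold Spec_remove_percentage_substring; infer_instance

-- ===== CLAIM (what is proved, stated in full; the proofs are below) =====
def Claim_equal_remove_percentage_substring : Prop := ∀ (string : String), Dom_remove_percentage_substring string → Spec_remove_percentage_substring string (remove_percentage_substring string)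

-- ===== LEMMAS AND PROOFS =====

-- index of the last space of l (indices starting at i, accumulator acc): the value both loops determine
def pvLsAux (l : List Char) (i : Nat) (acc : Option Nat) : Option Nat :=
  match l with
  | [] => acc
  | c :: rest => pvLsAux rest (i + 1) (if c = ' ' then some i else acc)

theorem pvLsAux_snoc (l : List Char) (c : Char) : ∀ (i : Nat) (acc : Option Nat),
    pvLsAux (l ++ [c]) i acc = if c = ' ' then some (i + l.length) else pvLsAux l i acc := by
  induction l with
  | nil => intro i acc; simp [pvLsAux]
  | cons d l ih =>
    intro i acc
    simp only [List.cons_append, pvLsAux, ih, List.length_cons]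
    split_ifs <;> first | rfl | (simp only [Option.some.injEq]; omega)

-- range(n, -1, -1) peels its first element n
theorem pvPyRangeDown (n : Nat) :
    PySem.List.pyRange ((n : Int)) (-1) (-1) = (n : Int) :: PySem.List.pyRange ((n : Int) - 1) (-1) (-1) := by
  have hA : (-1:Int) < (n:Int) := by omega
  simp only [PySem.List.pyRange, if_neg (by norm_num : ¬ ((-1:Int) = 0)),
    if_neg (by norm_num : ¬ ((0:Int) < -1)), if_pos hA]
  have hl1 : (((n:Int) - -1 + - -1 - 1) / - -1).toNat = n + 1 := by norm_num
  rw [hl1]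
  rcases Nat.eq_zero_or_pos n with h0 | hp
  · subst h0; norm_num
  · have hB : (-1:Int) < (n:Int) - 1 := by omega
    rw [if_pos hB]
    have hl2 : (((n:Int) - 1 - -1 + - -1 - 1) / - -1).toNat = n := by norm_num
    rw [hl2, List.range_succ_eq_map]
    simp only [List.map_cons, List.map_map]
    norm_num
    intro a _
    ring

-- A's backward scan from index n-1 computes the last space of the first n characters
theorem pvALoop_eq (s : String) (res : String) : ∀ (n : Nat), n ≤ s.toList.length →
    pvALoop s (PySem.List.pyRange ((n : Int) - 1) (-1) (-1)) res
      = match pvLsAux (s.toList.take n) 0 none with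
        | some j => PySem.Str.slice s (some 0) (some (j : Int))
        | none => res := by
  intro n
  induction n with
  | zero => intro _; simp [pvALoop, pvLsAux, PySem.List.pyRange]
  | succ m ih =>
    intro h
    have hm : m < s.toList.length := by omega
    rw [show ((m + 1 : Nat) : Int) - 1 = (m : Int) by push_cast; ring, pvPyRangeDown]
    have htake : s.toList.take (m + 1) = s.toList.take m ++ [s.toList[m]] :=
      List.take_succ_eq_append_getElem hm
    rw [htake, pvLsAux_snoc]
    have hlen : (s.toList.take m).length = m := by rw [List.length_take]; omega
    rw [hlen]
    simp only [pvALoop, PySem.Str.pyGet?_natCast]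
    rw [List.getElem?_eq_getElem hm]
    by_cases hc : s.toList[m] = ' '
    · simp [hc]
    · simp only [Option.some.injEq]
      rw [if_neg (by simpa using hc), if_neg (by simpa using hc)]
      exact ih (by omega)

theorem pvBLoop_no_pct (s : String) : ∀ (l : List Char) (i : Nat) (last : Option Nat),
    '%' ∉ l → pvBLoop s l i last = s := by
  intro l
  induction l with
  | nil => intro i last _; simp [pvBLoop]
  | cons c rest ih =>
    intro i last h
    have hc : c ≠ '%' := fun hcc => h (hcc ▸ List.mem_cons_self ..)
    simp only [pvBLoop, if_neg hc]
    exact ih _ _ (fun hm => h (List.mem_cons_of_mem _ hm))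

-- B's forward pass, arriving at the first '%' with accumulator acc, truncates at the last space
theorem pvBLoop_pct (s : String) : ∀ (m rest : List Char) (i : Nat) (acc : Option Nat),
    '%' ∉ m → pvBLoop s (m ++ '%' :: rest) i acc
      = match pvLsAux m i acc with
        | some j => PySem.Str.slice s (some 0) (some (j : Int))
        | none => s := by
  intro m
  induction m with
  | nil => intro rest i acc _; simp [pvBLoop, pvLsAux]
  | cons c m ih =>
    intro rest i acc h
    have hc : c ≠ '%' := fun hcc => h (hcc ▸ List.mem_cons_self ..)
    simp only [List.cons_append, pvBLoop, if_neg hc, pvLsAux]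
    exact ih _ _ _ (fun hm => h (List.mem_cons_of_mem _ hm))

theorem pvSingPrefix (a : Char) (l : List Char) : [a] <+: l ↔ l.head? = some a := by
  cases l with
  | nil => simp
  | cons b t => simp [List.cons_prefix_cons, eq_comm]

-- string.find("%") is -1 iff no '%'; otherwise it is the index of the first '%'
theorem pvFind_cases (s : String) :
    (PySem.Str.find s "%" = -1 ∧ '%' ∉ s.toList) ∨
    (∃ e : Nat, PySem.Str.find s "%" = (e : Int) ∧ e < s.toList.length ∧
      s.toList[e]? = some '%' ∧ '%' ∉ s.toList.take e) := by
  have hb : PySem.Str.find s "%" = PySem.Chars.find s.toList ['%'] := by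
    simp [PySem.Str.find_eq]
  rcases eq_or_lt_of_le (PySem.Chars.neg_one_le_find s.toList ['%']) with hneg | hpos
  · left
    refine ⟨by rw [hb, ← hneg], ?_⟩
    have hni := (PySem.Chars.find_eq_neg_one_iff (s := s.toList) (sub := ['%'])).mp hneg.symm
    intro hmem
    obtain ⟨u, v, huv⟩ := List.append_of_mem hmem
    exact hni ⟨u, v, by simp [huv]⟩
  · right
    have h0 : 0 ≤ PySem.Chars.find s.toList ['%'] := by omega
    obtain ⟨hpre, hmin⟩ := PySem.Chars.find_spec (s := s.toList) (sub := ['%']) h0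
    set e : Nat := (PySem.Chars.find s.toList ['%']).toNat with he
    have hget : s.toList[e]? = some '%' := by
      have := (pvSingPrefix '%' (s.toList.drop e)).mp hpre
      rwa [List.head?_drop] at this
    have hlt : e < s.toList.length := by
      by_contra hge
      rw [List.getElem?_eq_none (by omega)] at hget
      simp at hget
    refine ⟨e, by rw [hb]; omega, hlt, hget, ?_⟩
    intro hmem
    obtain ⟨i, hi, hgi⟩ := List.getElem_of_mem hmem
    have hilt : i < e := by
      have := List.length_take (i := e) (l := s.toList)
      omega
    refine hmin i hilt ?_
    rw [pvSingPrefix, List.head?_drop, List.getElem?_eq_getElem (by omega)]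
    rw [List.getElem_take] at hgi
    simp [hgi]

-- ===== VERDICT (by name: the statement is the Claim_ definition above) =====
theorem remove_percentage_substring_spec : Claim_equal_remove_percentage_substring := by
  intro s _
  unfold Spec_remove_percentage_substring
  rw [show remove_percentage_substring s
        = pvALoop s (PySem.List.pyRange (PySem.Str.find s "%") (-1) (-1)) s from rfl,
      show remove_percentage_substring_alt s = pvBLoop s s.toList 0 none from rfl]
  rcases pvFind_cases s with ⟨hf, hnp⟩ | ⟨e, hf, he, hget, hnp⟩
  · rw [hf, show PySem.List.pyRange (-1) (-1) (-1) = ([] : List Int) from by decide]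
    simp only [pvALoop]
    exact (pvBLoop_no_pct s s.toList 0 none hnp).symm
  · rw [hf]
    have hsplit : s.toList = s.toList.take e ++ '%' :: s.toList.drop (e + 1) := by
      conv_lhs => rw [← List.take_append_drop e s.toList]
      rw [List.drop_eq_getElem_cons he]
      have hgv : s.toList[e] = '%' := by
        have h := List.getElem?_eq_getElem he; rw [h] at hget; exact Option.some.inj hget
      rw [hgv]
    have hA : pvALoop s (PySem.List.pyRange ((e : Int)) (-1) (-1)) s
        = match pvLsAux (s.toList.take (e + 1)) 0 none with
          | some j => PySem.Str.slice s (some 0) (some (j : Int))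
          | none => s := by
      have h := pvALoop_eq s s (e + 1) (by omega)
      rwa [show ((e + 1 : Nat) : Int) - 1 = (e : Int) by push_cast; ring] at h
    have htake1 : s.toList.take (e + 1) = s.toList.take e ++ ['%'] := by
      rw [List.take_succ_eq_append_getElem he]
      have hgv : s.toList[e] = '%' := by
        have h := List.getElem?_eq_getElem he; rw [h] at hget; exact Option.some.inj hget
      rw [hgv]
    rw [hA, htake1, pvLsAux_snoc]
    rw [if_neg (by decide : ¬ ('%' = ' '))]
    conv_rhs => rw [hsplit]
    rw [pvBLoop_pct s _ _ 0 none hnp]
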